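-- pv_equiv track=rewrite | github.com/Bishwa-nath/LeetCode_Solutions | 2373. Largest Local Values in a Matrix.py | largestLocal
-- ===== SOURCE A (Python) =====
-- from typing import List
--
-- def largestLocal(grid: List[List[int]]) -> List[List[int]]:
--     n = len(grid)
--     res = []
--     for i in range(1, n - 1):
--         temp = []
--         for j in range(1, n - 1):
--             mx = 0
--             for k in range(i - 1, i + 2):
--                 for l in range(j - 1, j + 2):
--                     mx = max(mx, grid[k][l])
--             temp.append(mx)
--         res.append(temp)
--
--     return res
-- ===== SOURCE B (Python) =====
-- from typing import List
--
-- def largestLocal(grid: List[List[int]]) -> List[List[int]]: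
--     n = len(grid)
--     if n < 3:
--         return []
--     # separable filter: horizontal 3-max per row, then vertical 3-max per column
--     rowmax = [[max(row[j - 1], row[j], row[j + 1]) for j in range(1, n - 1)] for row in grid]
--     return [[max(0, rowmax[i - 1][j - 1], rowmax[i][j - 1], rowmax[i + 1][j - 1])
--              for j in range(1, n - 1)] for i in range(1, n - 1)]
-- ===== Notes on version B (the rewrite author's own statement) =====
-- stated objective: faster
-- what changed: Replaces the nested 3x3 window scan (9 reads per cell) by a separable filter: one horizontal 3-max pass building a rowmax table, then one vertical 3-max pass over that table (clamped at 0 like A's accumulator).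
import Mathlib
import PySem

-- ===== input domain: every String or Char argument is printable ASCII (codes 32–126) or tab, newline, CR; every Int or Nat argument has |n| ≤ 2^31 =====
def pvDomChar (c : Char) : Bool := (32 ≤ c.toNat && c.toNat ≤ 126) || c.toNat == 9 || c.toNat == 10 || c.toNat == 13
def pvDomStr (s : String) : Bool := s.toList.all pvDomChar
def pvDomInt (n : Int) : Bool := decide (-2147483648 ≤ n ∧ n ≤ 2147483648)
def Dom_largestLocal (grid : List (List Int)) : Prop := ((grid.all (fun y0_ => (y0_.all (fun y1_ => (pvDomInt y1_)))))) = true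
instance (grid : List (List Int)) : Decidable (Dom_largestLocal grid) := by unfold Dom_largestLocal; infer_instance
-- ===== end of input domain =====

-- B replaces A's nested 3x3 scan (9 reads per cell) by a separable filter: a horizontal
-- 3-max row pass, then a vertical 3-max pass over that table (fewer reads per cell: a constant-factor speedup).

-- grid[k][l] under Pre_ (in range there); none-default rendered with getD
def pvAt (xs : List Int) (i : Int) : Int := PySem.List.pyGetD xs i 0

-- ===== PORT A =====
def pvRowA (g : List (List Int)) (i : Int) : List Int := PySem.List.pyGetD g i []

def largestLocal (grid : List (List Int)) : List (List Int) :=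
  let n : Int := grid.length
  (PySem.List.pyRange 1 (n - 1) 1).map (fun i =>
    (PySem.List.pyRange 1 (n - 1) 1).map (fun j =>
      (PySem.List.pyRange (i - 1) (i + 2) 1).foldl (fun mx k =>
        (PySem.List.pyRange (j - 1) (j + 2) 1).foldl (fun mx l =>
          max mx (pvAt (pvRowA grid k) l)) mx) 0))

-- ===== PORT B =====
def largestLocal_alt (grid : List (List Int)) : List (List Int) :=
  let n : Int := grid.length
  if n < 3 then []
  else
    let rowmax : List (List Int) := grid.map (fun row =>
      (PySem.List.pyRange 1 (n - 1) 1).map (fun j =>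
        max (max (pvAt row (j - 1)) (pvAt row j)) (pvAt row (j + 1))))
    (PySem.List.pyRange 1 (n - 1) 1).map (fun i =>
      (PySem.List.pyRange 1 (n - 1) 1).map (fun j =>
        max (max (max 0 (pvAt (pvRowA rowmax (i - 1)) (j - 1)))
                 (pvAt (pvRowA rowmax i) (j - 1)))
            (pvAt (pvRowA rowmax (i + 1)) (j - 1))))

-- ===== PRECONDITION & SPEC =====
-- Pre_ excludes exactly the grids on which A raises IndexError: when n = len(grid) ≥ 3,
-- every row must have at least n entries (A reads columns up to n-1 in each of the rows).
def Pre_largestLocal (grid : List (List Int)) : Prop :=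
  (decide (grid.length < 3) || grid.all (fun r => decide (grid.length ≤ r.length))) = true
instance (grid : List (List Int)) : Decidable (Pre_largestLocal grid) := by
  unfold Pre_largestLocal; infer_instance

def pvWitness_largestLocal : List (List Int) := [[1, 2, 3], [4, 5, 6], [7, 8, 9]]

def Spec_largestLocal (grid : List (List Int)) (out : List (List Int)) : Prop := out = largestLocal_alt grid
instance (grid : List (List Int)) (out : List (List Int)) : Decidable (Spec_largestLocal grid out) := by unfold Spec_largestLocal; infer_instance

-- ===== CLAIM (what is proved, stated in full; the proofs are below) =====
def Claim_equal_largestLocal : Prop := ∀ (grid : List (List Int)), Dom_largestLocal grid → Pre_largestLocal grid → Spec_largestLocal grid (largestLocal grid)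

-- ===== LEMMAS AND PROOFS =====

lemma pvRange3 (a : Int) : PySem.List.pyRange (a - 1) (a + 2) 1 = [a - 1, a, a + 1] := by
  rw [PySem.List.pyRange_one_cons (by omega), PySem.List.pyRange_one_cons (by omega),
      PySem.List.pyRange_one_cons (by omega), PySem.List.pyRange_one_eq_nil (by omega)]
  norm_num

lemma pvRowA_map (g : List (List Int)) (f : List Int → List Int) (k : Int)
    (h0 : 0 ≤ k) (h1 : k < (g.length : Int)) :
    pvRowA (g.map f) k = f (pvRowA g k) := by
  unfold pvRowA
  rw [PySem.List.pyGetD_eq_getElem _ _ h0 (by simpa using h1),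
      PySem.List.pyGetD_eq_getElem _ _ h0 h1]
  simp

lemma pvAt_map_range (f : Int → Int) (b j : Int) (h1 : 1 ≤ j) (h2 : j < b) :
    pvAt ((PySem.List.pyRange 1 b 1).map f) (j - 1) = f j := by
  have hj : (j - 1) = (((j - 1).toNat : Nat) : Int) := by omega
  rw [pvAt, hj, PySem.List.pyGetD_natCast]
  have hlt : j.toNat - 1 < b.toNat - 1 := by omega
  rw [PySem.List.pyRange_one]
  simp [List.getD_eq_getElem?_getD, List.getElem?_map, List.getElem?_range hlt]
  congr 1
  omega

set_option maxHeartbeats 1000000 in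
lemma largestLocal_eq_alt (grid : List (List Int)) (_hpre : Pre_largestLocal grid) :
    largestLocal grid = largestLocal_alt grid := by
  unfold largestLocal largestLocal_alt
  by_cases h3 : ((grid.length : Int)) < 3
  · simp only [if_pos h3, PySem.List.pyRange_one_eq_nil (by omega : ((grid.length : Int)) - 1 ≤ 1),
      List.map_nil]
  · rw [not_lt] at h3
    have hnc : ¬ ((grid.length : Int) < 3) := by omega
    simp only [if_neg hnc]
    apply List.map_congr_left
    intro i hi
    rw [PySem.List.mem_pyRange_one] at hi
    apply List.map_congr_left
    intro j hj
    rw [PySem.List.mem_pyRange_one] at hj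
    -- rewrite the three rowmax lookups on the RHS
    have hrow : ∀ k : Int, 0 ≤ k → k < (grid.length : Int) →
        pvAt (pvRowA (grid.map (fun row =>
          (PySem.List.pyRange 1 ((grid.length : Int) - 1) 1).map (fun j' =>
            max (max (pvAt row (j' - 1)) (pvAt row j')) (pvAt row (j' + 1))))) k) (j - 1)
        = max (max (pvAt (pvRowA grid k) (j - 1)) (pvAt (pvRowA grid k) j))
              (pvAt (pvRowA grid k) (j + 1)) := by
      intro k hk0 hk1
      rw [pvRowA_map _ _ _ hk0 hk1]
      exact pvAt_map_range _ _ _ hj.1 hj.2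
    rw [hrow (i - 1) (by omega) (by omega), hrow i (by omega) (by omega),
        hrow (i + 1) (by omega) (by omega)]
    rw [pvRange3 i, pvRange3 j]
    simp only [List.foldl_cons, List.foldl_nil]
    ac_rfl

-- ===== VERDICT (by name: the statement is the Claim_ definition above) =====
theorem largestLocal_spec : Claim_equal_largestLocal := by
  intro grid _ hpre
  unfold Spec_largestLocal
  exact largestLocal_eq_alt grid hpre
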